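-- pv_equiv track=rewrite | github.com/zillionare/zillionare | scripts/podcast.py | to_cm_admonition
-- ===== SOURCE A (Python) =====
-- def to_cm_admonition(lines: list[str]):
--     output = []
--     last_speaker = None
--     for line in lines:
--         line = line.strip()
--         if not line:
--             continue
--
--         if ':' in line:
--             speaker, content = line.split(':', 1)
--             speaker = speaker.strip('* ')
--             content = content.strip()
--         else:
--             speaker, content = '', line.strip()
--
--         if content == '':
--             continue
--
--         if speaker != last_speaker:
--             if last_speaker is not None:
--                 output.append('')  # 插入空行
--             if speaker:
--                 # CommonMark格式的admonition，说话人作为title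
--                 admon_type = "tip" if speaker == "Flora" else "note"
--                 output.append(f'!!! {admon_type} "{speaker}"')
--                 output.append(f'    {content}')
--             else:
--                 output.append(content)
--         else:
--             if speaker:
--                 output.append(f'    {content}')
--             else:
--                 output.append(content)
--         last_speaker = speaker
--
--     return output
-- ===== SOURCE B (Python) =====
-- def _parse(line):
--     line = line.strip()
--     if not line:
--         return None
--     if ':' in line:
--         speaker, content = line.split(':', 1)
--         speaker, content = speaker.strip('* '), content.strip()
--     else:
--         speaker, content = '', line
--     return (speaker, content) if content else None
--
--
-- def to_cm_admonition(lines: list[str]):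
--     # pipeline: parse lines into (speaker, content) pairs, group consecutive
--     # same-speaker runs, render each run, join runs with a blank line
--     pairs = [p for p in map(_parse, lines) if p is not None]
--     blocks = []
--     i = 0
--     while i < len(pairs):
--         speaker = pairs[i][0]
--         j = i
--         while j < len(pairs) and pairs[j][0] == speaker:
--             j += 1
--         group = pairs[i:j]
--         if speaker:
--             kind = "tip" if speaker == "Flora" else "note"
--             blocks.append([f'!!! {kind} "{speaker}"'] + ['    ' + c for _, c in group])
--         else:
--             blocks.append([c for _, c in group])
--         i = j
--     if not blocks:
--         return []
--     return blocks[0] + [s for b in blocks[1:] for s in [''] + b]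
-- ===== Notes on version B (the rewrite author's own statement) =====
-- stated objective: alternative
-- what changed: Replaced A's single-pass last_speaker state machine with a three-stage pipeline: parse every line into (speaker, content) pairs, split the pair list into maximal runs of consecutive equal speakers, render each run as a block and join blocks with a blank line.
import Mathlib
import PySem

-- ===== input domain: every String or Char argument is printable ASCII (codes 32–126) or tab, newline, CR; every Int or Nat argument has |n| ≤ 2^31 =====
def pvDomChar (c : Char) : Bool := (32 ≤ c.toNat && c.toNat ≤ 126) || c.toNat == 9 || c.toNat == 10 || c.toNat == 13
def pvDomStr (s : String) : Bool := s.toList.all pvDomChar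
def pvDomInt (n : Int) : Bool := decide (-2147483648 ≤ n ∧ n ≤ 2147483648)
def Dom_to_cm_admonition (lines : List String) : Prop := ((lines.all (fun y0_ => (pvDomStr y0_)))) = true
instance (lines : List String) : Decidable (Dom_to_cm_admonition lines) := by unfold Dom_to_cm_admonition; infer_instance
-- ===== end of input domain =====

-- B rewrites A's last_speaker state machine as a parse / group-consecutive-runs / render-and-join
-- pipeline (objective: alternative decomposition, same cost); return values proved equal on all inputs.

-- shared formatting helpers (both Pythons build these exact f-strings)
def pvMkHeader (sp : String) : String := "!!! " ++ (if sp = "Flora" then "tip" else "note") ++ " \"" ++ sp ++ "\""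
def pvIndent (c : String) : String := "    " ++ c

-- ===== PORT A =====
-- the body of A's for-loop after the two `continue`s (speaker/content already parsed)
def pvStepPair (st : List String × Option String) (p : String × String) : List String × Option String :=
  if some p.1 ≠ st.2 then
    ((st.1 ++ (if st.2 = none then [] else [""])) ++
      (if p.1 ≠ "" then [pvMkHeader p.1, pvIndent p.2] else [p.2]), some p.1)
  else
    (st.1 ++ (if p.1 ≠ "" then [pvIndent p.2] else [p.2]), some p.1)

-- one iteration of A's for-loop: strip, skip blanks, split on ':', skip empty content, update state
def pvStepA (st : List String × Option String) (line : String) : List String × Option String :=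
  let l := PySem.Str.strip line
  if l = "" then st
  else
    let sc :=
      if PySem.Str.isIn ":" l then
        let parts := (PySem.Str.splitMax? l ":" 1).getD []
        (PySem.Str.stripChars (parts.getD 0 "") "* ", PySem.Str.strip (parts.getD 1 ""))
      else ("", PySem.Str.strip l)
    if sc.2 = "" then st else pvStepPair st sc

def to_cm_admonition (lines : List String) : List String :=
  (lines.foldl pvStepA ([], none)).1

-- ===== PORT B =====
-- Source B's _parse: strip, blank → None, split on first ':', empty content → None
def pvParse (line : String) : Option (String × String) :=
  let l := PySem.Str.strip line
  if l = "" then none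
  else
    let sc :=
      if PySem.Str.isIn ":" l then
        let parts := (PySem.Str.splitMax? l ":" 1).getD []
        (PySem.Str.stripChars (parts.getD 0 "") "* ", PySem.Str.strip (parts.getD 1 ""))
      else ("", l)
    if sc.2 = "" then none else some sc

-- Source B's while-loop: split the pair list into maximal runs of consecutive equal speakers
def pvRuns : List (String × String) → List (List (String × String))
  | [] => []
  | p :: ps =>
    (p :: ps.takeWhile (fun q => q.1 == p.1)) :: pvRuns (ps.dropWhile (fun q => q.1 == p.1))
termination_by l => l.length
decreasing_by
  have := List.length_dropWhile_le (fun q => q.1 == p.1) ps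
  simp
  omega

-- Source B's per-group block
def pvRenderGroup (g : List (String × String)) : List String :=
  match g with
  | [] => []
  | (sp, c) :: rest =>
    if sp ≠ "" then pvMkHeader sp :: pvIndent c :: rest.map (fun q => pvIndent q.2)
    else c :: rest.map (fun q => q.2)

-- Source B's final join: first block, then each later block preceded by ''
def pvJoin : List (List String) → List String
  | [] => []
  | b :: bs => b ++ bs.flatMap (fun x => "" :: x)

def to_cm_admonition_alt (lines : List String) : List String :=
  pvJoin ((pvRuns (lines.filterMap pvParse)).map pvRenderGroup)

-- ===== PRECONDITION & SPEC =====
def Spec_to_cm_admonition (lines : List String) (out : List String) : Prop := out = to_cm_admonition_alt lines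
instance (lines : List String) (out : List String) : Decidable (Spec_to_cm_admonition lines out) := by unfold Spec_to_cm_admonition; infer_instance

-- ===== CLAIM (what is proved, stated in full; the proofs are below) =====
def Claim_equal_to_cm_admonition : Prop := ∀ (lines : List String), Dom_to_cm_admonition lines → Spec_to_cm_admonition lines (to_cm_admonition lines)

-- ===== LEMMAS AND PROOFS =====

-- Python's str.strip() is idempotent (general dropWhile/rdropWhile fact, then lifted)
theorem pv_dropWhile_rdropWhile_dropWhile (p : Char → Bool) (l : List Char) :
    List.dropWhile p (List.rdropWhile p (List.dropWhile p l)) = List.rdropWhile p (List.dropWhile p l) := by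
  rw [List.dropWhile_eq_self_iff]
  intro hl
  obtain ⟨t, ht⟩ := List.rdropWhile_prefix p (List.dropWhile p l)
  have hl2 : 0 < (List.dropWhile p l).length := by
    rw [← ht, List.length_append]; omega
  have h1 : (List.rdropWhile p (List.dropWhile p l) ++ t)[0]'(by simpa [ht] using hl2) =
      (List.rdropWhile p (List.dropWhile p l))[0]'hl := List.getElem_append_left hl
  have h2 := List.getElem_of_eq ht (i := 0)
  rw [← h1, h2 _]
  exact List.dropWhile_get_zero_not p l hl2

theorem pv_helper (p : Char → Bool) (l : List Char) :
    List.dropWhile p (List.dropWhile p (List.dropWhile p l).reverse).reverse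
      = (List.dropWhile p (List.dropWhile p l).reverse).reverse :=
  pv_dropWhile_rdropWhile_dropWhile p l

theorem pv_strip_idem (s : String) : PySem.Str.strip (PySem.Str.strip s) = PySem.Str.strip s := by
  have h : (PySem.Str.strip (PySem.Str.strip s)).toList = (PySem.Str.strip s).toList := by
    simp only [PySem.Str.toList_strip, PySem.Chars.strip, PySem.Chars.lstrip, PySem.Chars.rstrip]
    rw [pv_helper, List.reverse_reverse]
    exact pv_helper _ _
  exact String.toList_injective h

-- A's loop body is B's parse followed by the pair step
theorem pvStepA_eq (st : List String × Option String) (line : String) :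
    pvStepA st line = match pvParse line with | none => st | some p => pvStepPair st p := by
  simp only [pvStepA, pvParse, pv_strip_idem]
  split_ifs <;> rfl

-- A's whole fold equals the fold of pvStepPair over the parsed pairs
theorem pvFoldA (lines : List String) (st : List String × Option String) :
    lines.foldl pvStepA st = (lines.filterMap pvParse).foldl pvStepPair st := by
  induction lines generalizing st with
  | nil => rfl
  | cons x xs ih =>
    simp only [List.foldl_cons, List.filterMap_cons, pvStepA_eq]
    cases pvParse x <;> simp [ih]

-- what A's state machine emits from a given last_speaker, expressed recursively
def pvRenderFrom : Option String → List (String × String) → List String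
  | _, [] => []
  | last, (sp, c) :: rest =>
    (if some sp ≠ last then
      (if last = none then [] else [""]) ++ (if sp ≠ "" then [pvMkHeader sp, pvIndent c] else [c])
    else
      (if sp ≠ "" then [pvIndent c] else [c])) ++ pvRenderFrom (some sp) rest

theorem pvPairFold (ps : List (String × String)) (out : List String) (last : Option String) :
    (ps.foldl pvStepPair (out, last)).1 = out ++ pvRenderFrom last ps := by
  induction ps generalizing out last with
  | nil => simp [pvRenderFrom]
  | cons p rest ih =>
    obtain ⟨sp, c⟩ := p
    simp only [List.foldl_cons, pvStepPair, pvRenderFrom]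
    split_ifs with h1 <;> simp [ih, List.append_assoc]

-- continuation runs: from last_speaker = some sp, A emits the run of sp-lines as
-- continuation lines, then a blank and a fresh start
theorem pvRenderFrom_some (sp : String) (ps : List (String × String)) :
    pvRenderFrom (some sp) ps =
      (ps.takeWhile (fun q => q.1 == sp)).map (fun q => if q.1 ≠ "" then pvIndent q.2 else q.2) ++
      (if ps.dropWhile (fun q => q.1 == sp) = [] then []
       else "" :: pvRenderFrom none (ps.dropWhile (fun q => q.1 == sp))) := by
  induction ps with
  | nil => simp [pvRenderFrom]
  | cons q tl ih =>
    obtain ⟨qs, qc⟩ := q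
    by_cases h : qs = sp
    · subst h
      simp only [pvRenderFrom, List.takeWhile_cons, List.dropWhile_cons, beq_self_eq_true, if_true, ih]
      by_cases hq : qs = "" <;> simp [hq]
    · have hb : ((qs, qc).1 == sp) = false := by simp [h]
      simp [pvRenderFrom, hb, h]

theorem pvRenderFrom_none (ps : List (String × String)) :
    pvRenderFrom none ps = pvJoin ((pvRuns ps).map pvRenderGroup) := by
  match ps with
  | [] => simp [pvRenderFrom, pvRuns, pvJoin]
  | (sp, c) :: tl =>
    have ih := pvRenderFrom_none (tl.dropWhile (fun q => q.1 == sp))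
    simp only [pvRenderFrom, pvRenderFrom_some, pvRuns, List.map_cons, pvRenderGroup]
    by_cases hd : tl.dropWhile (fun q => q.1 == sp) = []
    · simp only [hd, pvRuns, List.map_nil]
      have hmap : ∀ q ∈ tl.takeWhile (fun q => q.1 == sp),
          (if q.1 ≠ "" then pvIndent q.2 else q.2) =
          (if sp ≠ "" then pvIndent q.2 else q.2) := by
        intro q hq
        have := List.mem_takeWhile_imp hq
        simp only [beq_iff_eq] at this
        rw [this]
      rw [List.map_congr_left hmap]
      by_cases hsp : sp = "" <;> simp [hsp, pvJoin]
    · obtain ⟨d, ds, hds⟩ : ∃ d ds, tl.dropWhile (fun q => q.1 == sp) = d :: ds := by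
        cases h : tl.dropWhile (fun q => q.1 == sp) with
        | nil => exact absurd h hd
        | cons d ds => exact ⟨d, ds, rfl⟩
      have hmap : ∀ q ∈ tl.takeWhile (fun q => q.1 == sp),
          (if q.1 ≠ "" then pvIndent q.2 else q.2) =
          (if sp ≠ "" then pvIndent q.2 else q.2) := by
        intro q hq
        have := List.mem_takeWhile_imp hq
        simp only [beq_iff_eq] at this
        rw [this]
      rw [List.map_congr_left hmap]
      rw [hds] at ih ⊢
      simp only [pvRuns, List.map_cons, pvJoin] at ih ⊢
      by_cases hsp : sp = "" <;> simp [hsp, ih]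
termination_by ps.length
decreasing_by
  have := List.length_dropWhile_le (fun q => q.1 == sp) tl
  simp
  omega

-- ===== VERDICT (by name: the statement is the Claim_ definition above) =====
theorem to_cm_admonition_spec : Claim_equal_to_cm_admonition := by
  intro lines _
  unfold Spec_to_cm_admonition to_cm_admonition to_cm_admonition_alt
  rw [pvFoldA, pvPairFold, pvRenderFrom_none]
  simp
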